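-- pv_equiv track=rewrite | github.com/DavidWhittingham/arcpyext | arcpyext/mapping/_mapping_helpers.py | tokenise_table_name
-- ===== SOURCE A (Python) =====
-- def tokenise_table_name(table_name):
--     """Given a feature class or feature dataset name, returns the schema (optional) and simple name"""
--
--     dot_count = table_name.count(".")
--
--     if dot_count == 2:
--         dot_pos = [pos for pos, char in enumerate(table_name) if char == "."]
--
--         return {
--             "database": table_name[:dot_pos[0]],
--             "schema": table_name[dot_pos[0] + 1:dot_pos[1]],
--             "name": table_name[dot_pos[1] + 1:]
--         }
--     elif dot_count == 1:
--         return {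
--             "database": None,
--             "schema": table_name[:table_name.index(".")],
--             "name": table_name[table_name.index(".") + 1:]
--         }
--     else:
--         return {"database": None, "schema": None, "name": table_name}
-- ===== SOURCE B (Python) =====
-- def tokenise_table_name(table_name):
--     """Given a feature class or feature dataset name, returns the schema (optional) and simple name"""
--
--     parts = table_name.split(".")
--
--     if len(parts) == 3:
--         database, schema, name = parts
--         return {"database": database, "schema": schema, "name": name}
--
--     if len(parts) == 2:
--         schema, name = parts
--         return {"database": None, "schema": schema, "name": name}
--
--     return {"database": None, "schema": None, "name": table_name}
-- ===== Notes on version B (the rewrite author's own statement) =====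
-- stated objective: simpler
-- what changed: B splits the table name on dots once and dispatches on the number of parts, replacing A's dot-counting, enumerate-based position list and index/position slicing.
import Mathlib
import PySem

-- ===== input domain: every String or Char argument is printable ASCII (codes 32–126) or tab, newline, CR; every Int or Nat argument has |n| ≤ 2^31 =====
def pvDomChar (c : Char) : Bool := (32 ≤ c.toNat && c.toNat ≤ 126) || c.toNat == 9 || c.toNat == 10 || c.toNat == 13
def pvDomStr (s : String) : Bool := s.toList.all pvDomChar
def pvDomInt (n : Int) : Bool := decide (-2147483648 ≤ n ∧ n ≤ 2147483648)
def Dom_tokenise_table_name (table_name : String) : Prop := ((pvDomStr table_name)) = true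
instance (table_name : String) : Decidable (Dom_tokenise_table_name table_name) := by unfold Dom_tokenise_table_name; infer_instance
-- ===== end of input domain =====

-- B replaces A's dot-counting plus enumerate/index position slicing by a single split on dots with
-- length-based dispatch (objective: simpler).

-- ===== PORT A =====
-- Literal port of A: count the dots, then slice by enumerated dot positions (2 dots) or by
-- index(".") (1 dot), else fall back to the whole string.
def tokenise_table_name (table_name : String) : List (String × Option String) :=
  let dot_count := PySem.Str.count table_name "."
  if dot_count = 2 then
    -- [pos for pos, char in enumerate(table_name) if char == "."]
    let dot_pos := ((PySem.List.enumerate table_name.toList 0).filter (fun p => p.2 == '.')).map (·.1)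
    -- dot_pos[0] / dot_pos[1]: in range here (dot_count == 2 guarantees two positions), so pyGetD is exact
    let p0 := PySem.List.pyGetD dot_pos 0 0
    let p1 := PySem.List.pyGetD dot_pos 1 0
    [("database", some (PySem.Str.slice table_name none (some p0))),
     ("schema",   some (PySem.Str.slice table_name (some (p0 + 1)) (some p1))),
     ("name",     some (PySem.Str.slice table_name (some (p1 + 1)) none))]
  else if dot_count = 1 then
    -- table_name.index("."): the dot exists here (dot_count == 1), so find never returns -1 (no ValueError)
    let i := PySem.Str.find table_name "."
    [("database", none),
     ("schema",   some (PySem.Str.slice table_name none (some i))),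
     ("name",     some (PySem.Str.slice table_name (some (i + 1)) none))]
  else
    [("database", none), ("schema", none), ("name", some table_name)]

-- ===== PORT B =====
-- Literal port of B: parts = table_name.split("."), then dispatch on len(parts).
def tokenise_table_name_alt (table_name : String) : List (String × Option String) :=
  let parts := PySem.Chars.splitOn table_name.toList ['.']
  match parts with
  | [database, schema, name] =>
    [("database", some (String.ofList database)),
     ("schema",   some (String.ofList schema)),
     ("name",     some (String.ofList name))]
  | [schema, name] =>
    [("database", none),
     ("schema",   some (String.ofList schema)),
     ("name",     some (String.ofList name))]
  | _ =>
    [("database", none), ("schema", none), ("name", some table_name)]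

-- ===== PRECONDITION & SPEC =====
def Spec_tokenise_table_name (table_name : String) (out : List (String × Option String)) : Prop := out = tokenise_table_name_alt table_name
instance (table_name : String) (out : List (String × Option String)) : Decidable (Spec_tokenise_table_name table_name out) := by unfold Spec_tokenise_table_name; infer_instance

-- ===== CLAIM (what is proved, stated in full; the proofs are below) =====
def Claim_equal_tokenise_table_name : Prop := ∀ (table_name : String), Dom_tokenise_table_name table_name → Spec_tokenise_table_name table_name (tokenise_table_name table_name)

-- ===== LEMMAS AND PROOFS =====

def fsplit (pre : List Char) : List Char → List (List Char)
  | [] => [pre]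
  | c :: rest => if c = '.' then pre :: fsplit [] rest else fsplit (pre ++ [c]) rest

theorem go_eq_fsplit : ∀ (l : List Char) (fuel : Nat) (cur : List Char) (acc : List (List Char)),
    l.length < fuel →
    PySem.Chars.splitOn.go ['.'] fuel l cur acc = acc.reverse ++ fsplit cur.reverse l := by
  intro l
  induction l with
  | nil =>
    intro fuel cur acc h
    cases fuel with
    | zero => omega
    | succ f => simp [PySem.Chars.splitOn.go, fsplit]
  | cons c rest ih =>
    intro fuel cur acc h
    cases fuel with
    | zero => simp at h
    | succ f =>
      by_cases hc : c = '.'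
      · subst hc
        simp only [PySem.Chars.splitOn.go, List.isPrefixOf]
        norm_num
        rw [ih f [] (cur.reverse :: acc) (by simpa using h)]
        simp [fsplit]
      · simp only [PySem.Chars.splitOn.go]
        rw [if_neg (by simp [List.isPrefixOf]; exact fun h' => hc h'.symm)]
        rw [ih f (c :: cur) acc (by simpa using h)]
        simp [fsplit, hc]

theorem splitOn_eq_fsplit (cs : List Char) : PySem.Chars.splitOn cs ['.'] = fsplit [] cs := by
  show PySem.Chars.splitOn.go ['.'] (cs.length + 1) cs [] [] = _
  rw [go_eq_fsplit cs (cs.length + 1) [] [] (by omega)]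
  simp

theorem fsplit_length (cs : List Char) : ∀ pre, (fsplit pre cs).length = cs.count '.' + 1 := by
  induction cs with
  | nil => intro pre; simp [fsplit]
  | cons c rest ih =>
    intro pre
    by_cases hc : c = '.'
    · subst hc; simp [fsplit, ih, List.count_cons]
    · simp [fsplit, hc, ih, List.count_cons, Ne.symm hc]

theorem fsplit_no_dot (cs : List Char) (h : '.' ∉ cs) : ∀ pre, fsplit pre cs = [pre ++ cs] := by
  induction cs with
  | nil => intro pre; simp [fsplit]
  | cons c rest ih =>
    intro pre
    simp only [List.mem_cons, not_or] at h
    simp [fsplit, Ne.symm h.1, ih h.2]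

theorem fsplit_dot (a : List Char) (ha : '.' ∉ a) : ∀ pre rest, fsplit pre (a ++ '.' :: rest) = (pre ++ a) :: fsplit [] rest := by
  induction a with
  | nil => intro pre rest; simp [fsplit]
  | cons c t ih =>
    intro pre rest
    simp only [List.mem_cons, not_or] at ha
    simp [fsplit, Ne.symm ha.1, ih ha.2]

theorem countgo_dot : ∀ (l : List Char) (fuel acc : Nat), l.length ≤ fuel →
    PySem.Chars.count.go ['.'] fuel l acc = acc + l.count '.' := by
  intro l
  induction l with
  | nil => intro fuel acc h; cases fuel <;> simp [PySem.Chars.count.go]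
  | cons c rest ih =>
    intro fuel acc h
    cases fuel with
    | zero => simp at h
    | succ f =>
      simp only [PySem.Chars.count.go, List.isPrefixOf]
      by_cases hc : c = '.'
      · subst hc
        norm_num
        rw [ih f (acc + 1) (by simpa using h)]
        omega
      · rw [if_neg (show ¬ (('.' == c && true) = true) by simp; exact fun h' => hc h'.symm)]
        rw [ih f acc (by simpa using h)]
        simp [List.count_cons, hc]

theorem chars_count_dot (cs : List Char) : PySem.Chars.count cs ['.'] = cs.count '.' := by
  show (if _ then _ else PySem.Chars.count.go ['.'] cs.length cs 0) = _
  rw [if_neg (by simp)]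
  rw [countgo_dot cs cs.length 0 le_rfl]
  omega

theorem findgo_dot (a : List Char) (ha : '.' ∉ a) : ∀ (k : Nat) (rest : List Char),
    PySem.Chars.find.go ['.'] (a ++ '.' :: rest) k = ((k + a.length : Nat) : Int) := by
  induction a with
  | nil =>
    intro k rest
    simp [PySem.Chars.find.go, List.isPrefixOf]
  | cons c t ih =>
    intro k rest
    simp only [List.mem_cons, not_or] at ha
    simp only [List.cons_append, PySem.Chars.find.go, List.isPrefixOf]
    rw [if_neg (by intro hx; exact ha.1 (by simpa using hx))]
    rw [ih ha.2 (k + 1) rest]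
    simp only [List.length_cons]
    push_cast; ring

def posL (k : Int) (cs : List Char) : List Int :=
  ((PySem.List.enumerate cs k).filter (fun p => p.2 == '.')).map (·.1)

theorem posL_no_dot (cs : List Char) (h : '.' ∉ cs) : ∀ k, posL k cs = [] := by
  induction cs with
  | nil => intro k; simp [posL, PySem.List.enumerate]
  | cons c rest ih =>
    intro k
    simp only [List.mem_cons, not_or] at h
    simp only [posL, PySem.List.enumerate_cons, List.filter_cons]
    rw [if_neg (by simp; exact fun h' => h.1 h'.symm)]
    exact ih h.2 (k + 1)

theorem posL_dot (k : Int) (l : List Char) : posL k ('.' :: l) = k :: posL (k + 1) l := by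
  simp [posL, PySem.List.enumerate_cons, List.filter_cons]

theorem posL_append (a : List Char) (ha : '.' ∉ a) : ∀ (k : Int) (l : List Char), posL k (a ++ l) = posL (k + a.length) l := by
  induction a with
  | nil => intro k l; simp [posL]
  | cons c t ih =>
    intro k l
    simp only [List.mem_cons, not_or] at ha
    simp only [List.cons_append, posL, PySem.List.enumerate_cons, List.filter_cons]
    rw [if_neg (by simp; exact fun h' => ha.1 h'.symm)]
    have := ih ha.2 (k + 1) l
    simp only [posL] at this
    have h2 : k + 1 + (t.length : Int) = k + ((c :: t).length : Int) := by
      simp only [List.length_cons]; push_cast; ring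
    rw [this, h2]

theorem dot_decomp (cs : List Char) (h : '.' ∈ cs) : ∃ a rest, cs = a ++ '.' :: rest ∧ '.' ∉ a := by
  induction cs with
  | nil => simp at h
  | cons c rest ih =>
    by_cases hc : c = '.'
    · exact ⟨[], rest, by simp [hc], by simp⟩
    · have : '.' ∈ rest := by simpa [Ne.symm hc, hc] using h
      obtain ⟨a, r, hr, hna⟩ := ih this
      exact ⟨c :: a, r, by simp [hr], by simp [hna]; exact fun h' => hc h'.symm⟩

-- String-level slice helpers
theorem strSlice_take (s : String) (n : Nat) :
    PySem.Str.slice s none (some (n : Int)) = String.ofList (s.toList.take n) := by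
  apply String.toList_inj.mp
  simp [PySem.List.slice_to_natCast]

theorem strSlice_drop (s : String) (n : Nat) :
    PySem.Str.slice s (some (n : Int)) none = String.ofList (s.toList.drop n) := by
  apply String.toList_inj.mp
  simp [PySem.List.slice_from_natCast]

theorem strSlice_mid (s : String) (m n : Nat) :
    PySem.Str.slice s (some (m : Int)) (some (n : Int)) = String.ofList ((s.toList.drop m).take (n - m)) := by
  apply String.toList_inj.mp
  simp [PySem.List.slice_natCast]

theorem list_four_decomp {α : Type} (L : List α) (h : 4 ≤ L.length) :
    ∃ w x y z t, L = w :: x :: y :: z :: t := by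
  rcases L with _ | ⟨w, _ | ⟨x, _ | ⟨y, _ | ⟨z, t⟩⟩⟩⟩ <;> simp at h
  exact ⟨w, x, y, z, t, rfl⟩

theorem main_eq (s : String) : tokenise_table_name s = tokenise_table_name_alt s := by
  have hcount : PySem.Str.count s "." = s.toList.count '.' := chars_count_dot s.toList
  have hsplit : PySem.Chars.splitOn s.toList ['.'] = fsplit [] s.toList := splitOn_eq_fsplit _
  rcases hc : s.toList.count '.' with _ | _ | _ | n
  · -- no dot: both fall through
    have hnd : '.' ∉ s.toList := by rw [← List.count_eq_zero]; exact hc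
    simp only [tokenise_table_name, tokenise_table_name_alt, hcount, hc, hsplit,
      fsplit_no_dot _ hnd]
    norm_num
  · -- one dot
    have hmem : '.' ∈ s.toList := List.count_pos_iff.mp (by omega)
    obtain ⟨a, rest, hd, hna⟩ := dot_decomp s.toList hmem
    have hnr : '.' ∉ rest := by
      rw [← List.count_eq_zero]
      have := hc; rw [hd] at this
      simp [List.count_append, List.count_cons, List.count_eq_zero.mpr hna] at this
      omega
    have hfind : PySem.Chars.find s.toList ".".toList = ((a.length : Nat) : Int) := by
      show PySem.Chars.find.go ['.'] s.toList 0 = _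
      rw [hd, findgo_dot a hna 0 rest]
      norm_num
    have h1 : PySem.Str.slice s none (some ((a.length : Nat) : Int)) = String.ofList a := by
      rw [strSlice_take, hd, List.take_left]
    have h2 : PySem.Str.slice s (some (((a.length : Nat) : Int) + 1)) none = String.ofList rest := by
      have : ((a.length : Nat) : Int) + 1 = ((a.length + 1 : Nat) : Int) := by push_cast; ring
      rw [this, strSlice_drop, hd, List.append_cons]
      have hl : a.length + 1 = (a ++ ['.']).length := by simp
      rw [hl, List.drop_left]
    have hB : PySem.Chars.splitOn s.toList ['.'] = [a, rest] := by
      rw [hsplit, hd, fsplit_dot a hna, fsplit_no_dot rest hnr]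
      simp
    simp only [tokenise_table_name, tokenise_table_name_alt, hcount, hc, hB]
    norm_num [hfind, h1, h2]
  · -- two dots
    have hmem : '.' ∈ s.toList := List.count_pos_iff.mp (by omega)
    obtain ⟨a, rest, hd, hna⟩ := dot_decomp s.toList hmem
    have hr1 : rest.count '.' = 1 := by
      have := hc; rw [hd] at this
      simp [List.count_append, List.count_cons, List.count_eq_zero.mpr hna] at this
      omega
    obtain ⟨b, c, hd2, hnb⟩ := dot_decomp rest (List.count_pos_iff.mp (by omega))
    have hnc : '.' ∉ c := by
      rw [← List.count_eq_zero]
      have := hr1; rw [hd2] at this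
      simp [List.count_append, List.count_cons, List.count_eq_zero.mpr hnb] at this
      omega
    have hcs : s.toList = a ++ '.' :: (b ++ '.' :: c) := by rw [hd, hd2]
    have hpos : posL 0 s.toList =
        [((a.length : Nat) : Int), ((a.length + 1 + b.length : Nat) : Int)] := by
      rw [hcs, posL_append a hna, posL_dot, posL_append b hnb, posL_dot, posL_no_dot c hnc]
      simp
    have h1 : PySem.Str.slice s none (some ((a.length : Nat) : Int)) = String.ofList a := by
      rw [strSlice_take, hcs, List.take_left]
    have h2 : PySem.Str.slice s (some (((a.length : Nat) : Int) + 1))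
        (some ((a.length + 1 + b.length : Nat) : Int)) = String.ofList b := by
      have he : ((a.length : Nat) : Int) + 1 = ((a.length + 1 : Nat) : Int) := by push_cast; ring
      rw [he, strSlice_mid]
      have hdrop : s.toList.drop (a.length + 1) = b ++ '.' :: c := by
        rw [hcs, List.append_cons a '.' (b ++ '.' :: c)]
        have hl : a.length + 1 = (a ++ ['.']).length := by simp
        rw [hl, List.drop_left]
      rw [hdrop]
      have : a.length + 1 + b.length - (a.length + 1) = b.length := by omega
      rw [this, List.take_left]
    have h3 : PySem.Str.slice s (some (((a.length + 1 + b.length : Nat) : Int) + 1)) none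
        = String.ofList c := by
      have he : ((a.length + 1 + b.length : Nat) : Int) + 1 = ((a.length + 1 + b.length + 1 : Nat) : Int) := by
        push_cast; ring
      rw [he, strSlice_drop]
      have : s.toList = (a ++ '.' :: b ++ ['.']) ++ c := by rw [hcs]; simp
      rw [this]
      have hl : a.length + 1 + b.length + 1 = (a ++ '.' :: b ++ ['.']).length := by simp; omega
      rw [hl, List.drop_left]
    have hB : PySem.Chars.splitOn s.toList ['.'] = [a, b, c] := by
      rw [hsplit, hcs, fsplit_dot a hna, fsplit_dot b hnb, fsplit_no_dot c hnc]
      simp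
    have hposL := hpos
    simp only [posL] at hposL
    push_cast at h2 h3
    simp only [tokenise_table_name, tokenise_table_name_alt, hcount, hc, hB]
    norm_num [hposL, PySem.List.pyGetD, PySem.List.pyGet?, PySem.List.pyIdx?, h1, h2, h3]
  · -- three or more dots: both fall through
    have hlen : 4 ≤ (fsplit [] s.toList).length := by rw [fsplit_length, hc]; omega
    obtain ⟨w, x, y, z, t, hwz⟩ := list_four_decomp _ hlen
    simp only [tokenise_table_name, tokenise_table_name_alt, hcount, hc, hsplit, hwz]
    rw [if_neg (by omega), if_neg (by omega)]

-- ===== VERDICT (by name: the statement is the Claim_ definition above) =====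
theorem tokenise_table_name_spec : Claim_equal_tokenise_table_name := by
  intro s _
  unfold Spec_tokenise_table_name
  exact main_eq s
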